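-- pv_equiv track=rewrite | github.com/wojdylakjr/AGH-Python | lab7.py | gen_zeros
-- ===== SOURCE A (Python) =====
-- def gen_zeros(l):
--   amount = 0
--   first_zeros = 0 #tutaj sprawdzam ile jest 0 na poczatku, ktore nie stoja pomiedzy 1
--   if(l[0] == 0):
--     for i in l:
--       if i == 0:
--         first_zeros += 1
--       else:
--         break
--
--
--   for i in l[first_zeros:]:
--     if i == 0:
--       amount += 1
--     elif amount != 0:
--       yield amount
--       amount = 0
-- ===== SOURCE B (Python) =====
-- def gen_zeros(l):
--     # One pass of run-length encoding, then yield the zero-run lengths that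
--     # are strictly between the first and last run (i.e. flanked by non-zeros).
--     runs = []
--     cur = None  # current run: (is_zero, length)
--     for x in l:
--         z = (x == 0)
--         if cur is not None and cur[0] == z:
--             cur = (z, cur[1] + 1)
--         else:
--             if cur is not None:
--                 runs.append(cur)
--             cur = (z, 1)
--     if cur is not None:
--         runs.append(cur)
--     for z, n in runs[1:-1]:
--         if z:
--             yield n
-- ===== Notes on version B (the rewrite author's own statement) =====
-- stated objective: alternative
-- what changed: B replaces A's leading-zero prescan plus stateful streaming loop by a single run-length-encoding pass followed by slicing off the first and last run and yielding the zero-run lengths in between; Pre_ excludes only the empty list, on which A raises IndexError (it reads l[0]) while B yields nothing.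
import Mathlib
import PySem

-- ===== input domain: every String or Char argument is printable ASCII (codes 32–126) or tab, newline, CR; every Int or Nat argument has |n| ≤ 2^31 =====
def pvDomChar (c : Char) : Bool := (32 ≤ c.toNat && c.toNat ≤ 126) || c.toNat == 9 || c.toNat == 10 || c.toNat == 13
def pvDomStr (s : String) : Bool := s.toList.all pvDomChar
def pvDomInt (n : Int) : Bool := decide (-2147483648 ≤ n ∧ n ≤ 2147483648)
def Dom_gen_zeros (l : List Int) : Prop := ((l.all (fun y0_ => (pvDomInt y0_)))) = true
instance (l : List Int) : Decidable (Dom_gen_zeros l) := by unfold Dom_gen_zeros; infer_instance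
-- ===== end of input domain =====

-- B replaces A's leading-zero prescan + stateful streaming loop by one run-length-encoding
-- pass followed by runs[1:-1]; same cost, different structure ("alternative").

-- ===== PORT A =====
-- A's first loop: count of leading zeros (with break on the first non-zero)
def pvCountLead : List Int → Int
  | [] => 0
  | x :: xs => if x == 0 then 1 + pvCountLead xs else 0

-- A's second loop over l[first_zeros:], state (amount, yielded-so-far)
def pvLoopA : List Int → Int → List Int → List Int
  | [], _, out => out
  | i :: rest, amount, out =>
    if i == 0 then pvLoopA rest (amount + 1) out
    else if amount != 0 then pvLoopA rest 0 (out ++ [amount])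
    else pvLoopA rest amount out

def gen_zeros (l : List Int) : List Int :=
  match PySem.List.pyGet? l 0 with
  | none => []  -- l[0] raises IndexError on []; excluded by Pre_gen_zeros
  | some h =>
    let first_zeros : Int := if h == 0 then pvCountLead l else 0
    pvLoopA (PySem.List.slice l (some first_zeros) none) 0 []

-- ===== PORT B =====
-- B's run-length-encoding loop: cur is the current run (is_zero, length), runs the finished ones
def pvRleGo : List Int → Option (Bool × Int) → List (Bool × Int) → List (Bool × Int)
  | [], none, runs => runs
  | [], some c, runs => runs ++ [c]
  | x :: xs, cur, runs =>
    let z : Bool := x == 0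
    match cur with
    | some c =>
      if c.1 == z then pvRleGo xs (some (z, c.2 + 1)) runs
      else pvRleGo xs (some (z, 1)) (runs ++ [c])
    | none => pvRleGo xs (some (z, 1)) runs

def gen_zeros_alt (l : List Int) : List Int :=
  let runs := pvRleGo l none []
  (PySem.List.slice runs (some 1) (some (-1))).filterMap
    (fun c => if c.1 then some c.2 else none)

-- ===== PRECONDITION & SPEC =====
-- Pre_ excludes only the empty list, on which A raises IndexError (it reads l[0]); B yields nothing there.
def Pre_gen_zeros (l : List Int) : Prop := l ≠ []
instance (l : List Int) : Decidable (Pre_gen_zeros l) := by unfold Pre_gen_zeros; infer_instance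
def pvWitness_gen_zeros : List Int := [1, 0, 0, 2, 0, 3, 0]

def Spec_gen_zeros (l : List Int) (out : List Int) : Prop := out = gen_zeros_alt l
instance (l : List Int) (out : List Int) : Decidable (Spec_gen_zeros l out) := by unfold Spec_gen_zeros; infer_instance

-- ===== CLAIM (what is proved, stated in full; the proofs are below) =====
def Claim_equal_gen_zeros : Prop := ∀ (l : List Int), Dom_gen_zeros l → Pre_gen_zeros l → Spec_gen_zeros l (gen_zeros l)

-- ===== LEMMAS AND PROOFS =====

-- canonical run-length encoding, built from the right
def pvMerge (c : Bool × Int) : List (Bool × Int) → List (Bool × Int)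
  | [] => [c]
  | d :: rest => if c.1 = d.1 then (c.1, c.2 + d.2) :: rest else c :: d :: rest

def pvRle : List Int → List (Bool × Int)
  | [] => []
  | x :: xs => pvMerge (x == 0, 1) (pvRle xs)

def pvFilt (r : List (Bool × Int)) : List Int :=
  r.filterMap (fun c => if c.1 then some c.2 else none)

def pvKN : List Int → Nat
  | [] => 0
  | x :: xs => if x = 0 then pvKN xs + 1 else 0

theorem pvMerge_head (c : Bool × Int) (r : List (Bool × Int)) :
    ∃ m t, pvMerge c r = (c.1, m) :: t := by
  obtain ⟨b, n⟩ := c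
  cases r with
  | nil => exact ⟨n, [], rfl⟩
  | cons d rest =>
    by_cases h : b = d.1
    · exact ⟨n + d.2, rest, by simp [pvMerge, h]⟩
    · exact ⟨n, d :: rest, by simp [pvMerge, h]⟩

theorem pvMerge_merge_same (z : Bool) (n : Int) (r : List (Bool × Int)) :
    pvMerge (z, n) (pvMerge (z, 1) r) = pvMerge (z, n + 1) r := by
  cases r with
  | nil => simp [pvMerge]
  | cons d rest =>
    by_cases h : z = d.1
    · simp [pvMerge, h]; ring
    · simp [pvMerge, h]

theorem pvMerge_merge_ne (c : Bool × Int) (z : Bool) (n : Int) (r : List (Bool × Int))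
    (h : c.1 ≠ z) : pvMerge c (pvMerge (z, n) r) = c :: pvMerge (z, n) r := by
  obtain ⟨m, t, hm⟩ := pvMerge_head (z, n) r
  rw [hm]; simp [pvMerge, h]

theorem pvRleGo_spec (xs : List Int) : ∀ (b : Bool) (n : Int) (runs : List (Bool × Int)),
    pvRleGo xs (some (b, n)) runs = runs ++ pvMerge (b, n) (pvRle xs) := by
  induction xs with
  | nil => intro b n runs; simp [pvRleGo, pvRle, pvMerge]
  | cons x t ih =>
    intro b n runs
    have hr : pvRle (x :: t) = pvMerge (x == 0, 1) (pvRle t) := rfl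
    by_cases h : b = (x == 0)
    · have step : pvRleGo (x :: t) (some (b, n)) runs
          = pvRleGo t (some (x == 0, n + 1)) runs := by
        simp [pvRleGo, h]
      rw [step, ih, hr, ← h, pvMerge_merge_same]
    · have step : pvRleGo (x :: t) (some (b, n)) runs
          = pvRleGo t (some (x == 0, 1)) (runs ++ [(b, n)]) := by
        simp [pvRleGo, h]
      rw [step, ih, hr, pvMerge_merge_ne (b, n) (x == 0) 1 (pvRle t) h, List.append_assoc]
      rfl

theorem pvRleGo_none (l : List Int) : pvRleGo l none [] = pvRle l := by
  cases l with
  | nil => rfl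
  | cons x t =>
    show pvRleGo t (some (x == 0, 1)) [] = _
    rw [pvRleGo_spec]; rfl

-- runs[1:-1] as drop/dropLast
theorem pvSliceMid (r : List (Bool × Int)) :
    PySem.List.slice r (some 1) (some (-1)) = (r.drop 1).dropLast := by
  cases r with
  | nil => rfl
  | cons a t =>
    simp [PySem.List.slice, PySem.List.clampIdx]
    rw [if_neg (by omega : ¬ ((t.length : Int) < 0))]
    rw [List.dropLast_eq_take]

theorem pvFilt_dropLast_merge_false (n : Int) (r : List (Bool × Int)) :
    pvFilt ((pvMerge (false, n) r).dropLast) = pvFilt r.dropLast := by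
  cases r with
  | nil => rfl
  | cons d t =>
    by_cases h : d.1 = false
    · cases t with
      | nil => simp [pvMerge, h, pvFilt]
      | cons u v => simp [pvMerge, h, pvFilt]
    · have h' : d.1 = true := by revert h; cases d.1 <;> simp
      simp [pvMerge, h', pvFilt]

theorem pvFilt_cons_true (n : Int) (w : List (Bool × Int)) :
    pvFilt ((true, n) :: w) = n :: pvFilt w := by simp [pvFilt]

theorem pvLoopA_spec (xs : List Int) : ∀ (a : Int) (out : List Int), 0 ≤ a →
    pvLoopA xs a out =
      out ++ pvFilt ((if a = 0 then pvRle xs else pvMerge (true, a) (pvRle xs)).dropLast) := by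
  induction xs with
  | nil =>
    intro a out _
    by_cases h : a = 0 <;> simp [pvLoopA, h, pvRle, pvMerge, pvFilt]
  | cons x t ih =>
    intro a out ha
    by_cases hx : x = 0
    · -- zero element: amount increments
      subst hx
      have hr0 : pvRle (0 :: t) = pvMerge (true, 1) (pvRle t) := by
        simp [pvRle]
      have h1 : pvLoopA (0 :: t) a out = pvLoopA t (a + 1) out := by
        simp [pvLoopA]
      rw [h1, ih (a + 1) out (by omega), if_neg (by omega : ¬ (a + 1 = 0))]
      congr 2
      by_cases h0 : a = 0
      · subst h0; simp [hr0]
      · rw [if_neg h0, hr0, pvMerge_merge_same]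
    · -- non-zero element
      have hb : (x == 0) = false := by simp [hx]
      have hr : pvRle (x :: t) = pvMerge (false, 1) (pvRle t) := by
        simp [pvRle, hb]
      have e : ∀ r : List (Bool × Int),
          (if (0 : Int) = 0 then r else pvMerge (true, 0) r) = r := fun r => if_pos rfl
      by_cases h0 : a = 0
      · have h1 : pvLoopA (x :: t) a out = pvLoopA t a out := by
          simp [pvLoopA, hx, h0]
        rw [h1, h0, ih 0 out (le_refl 0), e, e, hr, pvFilt_dropLast_merge_false]
      · have h1 : pvLoopA (x :: t) a out = pvLoopA t 0 (out ++ [a]) := by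
          simp [pvLoopA, hx, h0]
        rw [h1, ih 0 (out ++ [a]) (le_refl 0), e, if_neg h0, hr]
        have hne : (true : Bool) ≠ false := by simp
        rw [pvMerge_merge_ne (true, a) false 1 (pvRle t) hne]
        obtain ⟨m, s, hm⟩ := pvMerge_head (false, 1) (pvRle t)
        have hrw := pvFilt_dropLast_merge_false 1 (pvRle t)
        rw [hm] at hrw ⊢
        cases s with
        | nil =>
          have h2 : pvFilt ((pvRle t).dropLast) = [] := by
            simpa [pvFilt] using hrw.symm
          rw [h2]
          simp [pvFilt]
        | cons u v =>
          rw [List.dropLast_cons₂, pvFilt_cons_true, hrw]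
          simp

theorem pvCountLead_eq (l : List Int) : pvCountLead l = (pvKN l : Int) := by
  induction l with
  | nil => rfl
  | cons x t ih =>
    by_cases h : x = 0
    · simp [pvCountLead, pvKN, h, ih]
      push_cast
      ring
    · simp [pvCountLead, pvKN, h]

theorem pvRle_strip : ∀ (l : List Int), 0 < pvKN l →
    pvRle l = (true, (pvKN l : Int)) :: pvRle (l.drop (pvKN l)) := by
  intro l
  induction l with
  | nil => intro h; simp [pvKN] at h
  | cons x t ih =>
    intro h
    by_cases hx : x = 0
    · subst hx
      have hk : pvKN ((0 : Int) :: t) = pvKN t + 1 := by simp [pvKN]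
      have hr : pvRle ((0 : Int) :: t) = pvMerge (true, 1) (pvRle t) := by simp [pvRle]
      rw [hk, hr]
      by_cases ht : 0 < pvKN t
      · rw [ih ht]
        have h1 : pvMerge (true, 1) ((true, (pvKN t : Int)) :: pvRle (t.drop (pvKN t)))
            = (true, 1 + (pvKN t : Int)) :: pvRle (t.drop (pvKN t)) := by simp [pvMerge]
        have h2 : ((pvKN t + 1 : Nat) : Int) = 1 + (pvKN t : Int) := by push_cast; ring
        rw [h1, h2, List.drop_succ_cons]
      · have hk0 : pvKN t = 0 := by omega
        rw [hk0]
        have hhead : pvRle t = [] ∨ ∃ m s, pvRle t = (false, m) :: s := by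
          cases t with
          | nil => left; rfl
          | cons y u =>
            right
            have hy : ¬ y = 0 := fun hy => by simp [pvKN, hy] at hk0
            have hb : (y == 0) = false := by simp [hy]
            have hyr : pvRle (y :: u) = pvMerge (false, 1) (pvRle u) := by simp [pvRle, hb]
            obtain ⟨m, s, hm⟩ := pvMerge_head (false, 1) (pvRle u)
            exact ⟨m, s, by rw [hyr, hm]⟩
        rcases hhead with h0 | ⟨m, s, hm⟩
        · rw [h0]; simp [pvMerge, List.drop_succ_cons, h0]
        · rw [hm]
          have hmm : pvMerge (true, 1) ((false, m) :: s) = (true, 1) :: (false, m) :: s := by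
            simp [pvMerge]
          rw [hmm]
          simp [List.drop_succ_cons, ← hm]
    · exfalso; simp [pvKN, hx] at h

theorem pvBridge (l : List Int) :
    pvFilt (((pvRle l).drop 1).dropLast) = pvFilt ((pvRle (l.drop (pvKN l))).dropLast) := by
  by_cases h : 0 < pvKN l
  · rw [pvRle_strip l h]; simp
  · have hk : pvKN l = 0 := by omega
    rw [hk]
    simp only [List.drop_zero]
    cases l with
    | nil => rfl
    | cons x t =>
      have hx : ¬ x = 0 := fun hx => by simp [pvKN, hx] at hk
      have hb : (x == 0) = false := by simp [hx]
      have hr : pvRle (x :: t) = pvMerge (false, 1) (pvRle t) := by simp [pvRle, hb]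
      obtain ⟨m, s, hm⟩ := pvMerge_head (false, 1) (pvRle t)
      rw [hr, hm]
      cases s with
      | nil => simp [pvFilt]
      | cons u v => simp [pvFilt, List.dropLast_cons₂]

theorem gen_zeros_alt_eq (l : List Int) :
    gen_zeros_alt l = pvFilt (((pvRle l).drop 1).dropLast) := by
  have h0 : gen_zeros_alt l = (PySem.List.slice (pvRleGo l none []) (some 1) (some (-1))).filterMap
      (fun c => if c.1 then some c.2 else none) := rfl
  rw [h0, pvRleGo_none, pvSliceMid]
  rfl

theorem gen_zeros_eq (l : List Int) (h : l ≠ []) :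
    gen_zeros l = pvFilt ((pvRle (l.drop (pvKN l))).dropLast) := by
  cases l with
  | nil => exact absurd rfl h
  | cons x t =>
    unfold gen_zeros
    have hget : PySem.List.pyGet? (x :: t) (0 : Int) = some x := by
      simp [PySem.List.pyGet?, PySem.List.pyIdx?]
    rw [hget]
    simp only
    have hfz : (if (x == 0) = true then pvCountLead (x :: t) else 0) = (pvKN (x :: t) : Int) := by
      by_cases hx : x = 0
      · simp [hx, pvCountLead_eq]
      · simp [hx, pvKN]
    rw [hfz, PySem.List.slice_from_natCast]
    rw [pvLoopA_spec (List.drop (pvKN (x :: t)) (x :: t)) 0 [] (le_refl 0)]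
    simp

-- ===== VERDICT (by name: the statement is the Claim_ definition above) =====
theorem gen_zeros_spec : Claim_equal_gen_zeros := by
  intro l _ hpre
  unfold Spec_gen_zeros
  rw [gen_zeros_eq l hpre, gen_zeros_alt_eq, pvBridge]
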